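-- pv_equiv track=rewrite | github.com/lawnguyenit/AgriFusion-IoT | Backend/Benchmark/fuzzy_logic_basic/layer1/alignment.py | _cluster_anchors
-- ===== SOURCE A (Python) =====
-- def _cluster_anchors(npk_ts: list[int], sht_ts: list[int], gap_sec: int) -> list[int]:
--     if not npk_ts and not sht_ts:
--         return []
--
--     npk_set = set(npk_ts)
--     all_points = sorted(set(npk_ts) | set(sht_ts))
--     clusters: list[list[int]] = []
--     current_cluster = [all_points[0]]
--     for ts in all_points[1:]:
--         if ts - current_cluster[-1] <= gap_sec:
--             current_cluster.append(ts)
--         else: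
--             clusters.append(current_cluster)
--             current_cluster = [ts]
--     clusters.append(current_cluster)
--
--     anchors: list[int] = []
--     for cluster in clusters:
--         npk_candidates = [ts for ts in cluster if ts in npk_set]
--         if npk_candidates:
--             anchors.append(max(npk_candidates))
--         else:
--             anchors.append(max(cluster))
--     return anchors
-- ===== SOURCE B (Python) =====
-- def _cluster_anchors(npk_ts: list[int], sht_ts: list[int], gap_sec: int) -> list[int]:
--     points = sorted(set(npk_ts) | set(sht_ts))
--     if not points:
--         return []
--     npk_set = set(npk_ts)
--     anchors: list[int] = []
--     prev = points[0]
--     best_npk = prev if prev in npk_set else None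
--     for ts in points[1:]:
--         if ts - prev > gap_sec:
--             anchors.append(best_npk if best_npk is not None else prev)
--             best_npk = None
--         if ts in npk_set:
--             best_npk = ts
--         prev = ts
--     anchors.append(best_npk if best_npk is not None else prev)
--     return anchors
-- ===== Notes on version B (the rewrite author's own statement) =====
-- stated objective: simpler
-- what changed: Replaces A's two-pass design (build an intermediate list of clusters, then a second pass doing a per-cluster filter and max scan) with a single fused pass over the sorted distinct points that maintains a running previous point and a running best-NPK candidate, emitting each cluster's anchor at every gap break.
import Mathlib
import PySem

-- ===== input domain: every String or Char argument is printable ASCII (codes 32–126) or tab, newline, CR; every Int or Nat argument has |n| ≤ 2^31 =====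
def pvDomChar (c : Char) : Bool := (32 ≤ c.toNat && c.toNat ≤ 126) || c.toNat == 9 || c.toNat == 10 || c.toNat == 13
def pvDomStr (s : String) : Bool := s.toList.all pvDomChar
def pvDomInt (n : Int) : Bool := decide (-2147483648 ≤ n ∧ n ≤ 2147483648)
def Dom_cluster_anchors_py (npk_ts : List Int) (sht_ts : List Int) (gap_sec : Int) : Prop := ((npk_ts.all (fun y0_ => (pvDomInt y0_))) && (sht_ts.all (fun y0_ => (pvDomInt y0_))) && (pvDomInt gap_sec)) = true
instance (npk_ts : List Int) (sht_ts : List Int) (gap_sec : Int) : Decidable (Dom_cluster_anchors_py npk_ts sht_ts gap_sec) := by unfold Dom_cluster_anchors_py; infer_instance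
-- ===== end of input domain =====

-- B fuses A's two passes (cluster list + per-cluster max scans) into one pass keeping a
-- running last-point `prev` and running best NPK point `best_npk`; objective: simpler.

-- ===== PORT A =====
-- max(xs) on a nonempty list
def pvAMax (xs : List Int) : Int := (PySem.List.max? xs (fun y => y)).getD 0

def cluster_anchors_py (npk_ts : List Int) (sht_ts : List Int) (gap_sec : Int) : List Int :=
  if npk_ts = [] ∧ sht_ts = [] then []
  else
    let npk_set : PySem.Set Int := PySem.Set.ofList npk_ts
    let all_points := PySem.List.sorted (PySem.Set.union (PySem.Set.ofList npk_ts) (PySem.Set.ofList sht_ts)) (fun x => x) false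
    match all_points with
    | [] => []  -- unreachable: all_points is nonempty when not both lists are empty
    | p0 :: rest =>
      let st := rest.foldl (fun (st : List (List Int) × List Int) ts =>
        if ts - PySem.List.pyGetD st.2 (-1) 0 ≤ gap_sec then (st.1, st.2 ++ [ts])
        else (st.1 ++ [st.2], [ts])) ([], [p0])
      let clusters := st.1 ++ [st.2]
      clusters.foldl (fun anchors cluster =>
        let npk_candidates := cluster.filter (fun ts => PySem.Set.contains npk_set ts)
        if npk_candidates ≠ [] then anchors ++ [pvAMax npk_candidates]
        else anchors ++ [pvAMax cluster]) []

-- ===== PORT B =====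
def pvAltLoop (npk_set : PySem.Set Int) (gap_sec : Int) :
    List Int → List Int → Int → Option Int → List Int
  | [], anchors, prev, best => anchors ++ [best.getD prev]
  | ts :: rest, anchors, prev, best =>
    if ts - prev > gap_sec then
      pvAltLoop npk_set gap_sec rest (anchors ++ [best.getD prev]) ts
        (if PySem.Set.contains npk_set ts then some ts else none)
    else
      pvAltLoop npk_set gap_sec rest anchors ts
        (if PySem.Set.contains npk_set ts then some ts else best)

def cluster_anchors_py_alt (npk_ts : List Int) (sht_ts : List Int) (gap_sec : Int) : List Int :=
  let points := PySem.List.sorted (PySem.Set.union (PySem.Set.ofList npk_ts) (PySem.Set.ofList sht_ts)) (fun x => x) false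
  match points with
  | [] => []
  | p0 :: rest =>
    let npk_set : PySem.Set Int := PySem.Set.ofList npk_ts
    pvAltLoop npk_set gap_sec rest [] p0
      (if PySem.Set.contains npk_set p0 then some p0 else none)

-- ===== PRECONDITION & SPEC =====
def Spec_cluster_anchors_py (npk_ts : List Int) (sht_ts : List Int) (gap_sec : Int) (out : List Int) : Prop := out = cluster_anchors_py_alt npk_ts sht_ts gap_sec
instance (npk_ts : List Int) (sht_ts : List Int) (gap_sec : Int) (out : List Int) : Decidable (Spec_cluster_anchors_py npk_ts sht_ts gap_sec out) := by unfold Spec_cluster_anchors_py; infer_instance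

-- ===== CLAIM (what is proved, stated in full; the proofs are below) =====
def Claim_equal_cluster_anchors_py : Prop := ∀ (npk_ts : List Int) (sht_ts : List Int) (gap_sec : Int), Dom_cluster_anchors_py npk_ts sht_ts gap_sec → Spec_cluster_anchors_py npk_ts sht_ts gap_sec (cluster_anchors_py npk_ts sht_ts gap_sec)

-- ===== LEMMAS AND PROOFS =====

-- A's per-cluster anchor
def pvAnchor (s : PySem.Set Int) (cluster : List Int) : Int :=
  let c := cluster.filter (fun ts => PySem.Set.contains s ts)
  if c ≠ [] then pvAMax c else pvAMax cluster

theorem foldl_max_pairwise : ∀ (t : List Int) (x : Int), (x :: t).Pairwise (· ≤ ·) →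
    t.foldl max x = ((x :: t).getLast?).getD 0
  | [], x, _ => rfl
  | y :: t, x, h => by
    have hx : x ≤ y := (List.pairwise_cons.1 h).1 y (by simp)
    have h' : (y :: t).Pairwise (· ≤ ·) := (List.pairwise_cons.1 h).2
    have ih := foldl_max_pairwise t y h'
    simp only [List.foldl_cons, max_eq_right hx, List.getLast?_cons_cons]
    exact ih

theorem pvAMax_eq_getLast (l : List Int) (h : l ≠ []) (hp : l.Pairwise (· ≤ ·)) :
    pvAMax l = (l.getLast?).getD 0 := by
  match l with
  | x :: t =>
    simp only [pvAMax, PySem.List.max?_id_cons, Option.getD_some]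
    exact foldl_max_pairwise t x hp

theorem pvAnchor_eq (s : PySem.Set Int) (cur : List Int) (hne : cur ≠ [])
    (hp : cur.Pairwise (· ≤ ·)) :
    pvAnchor s cur = ((cur.filter (fun ts => PySem.Set.contains s ts)).getLast?).getD ((cur.getLast?).getD 0) := by
  unfold pvAnchor
  by_cases hf : cur.filter (fun ts => PySem.Set.contains s ts) = []
  · simp only [hf, ne_eq, not_true_eq_false, if_false, List.getLast?_nil, Option.getD_none]
    exact pvAMax_eq_getLast cur hne hp
  · simp only [ne_eq, hf, not_false_eq_true, if_true]
    rw [pvAMax_eq_getLast _ hf (hp.filter _)]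
    cases hl : (cur.filter (fun ts => PySem.Set.contains s ts)).getLast? with
    | none => exact absurd (List.getLast?_eq_none_iff.1 hl) hf
    | some a => simp

theorem pvGetLastD_concat (l : List Int) (a : Int) (d : Int) :
    ((l ++ [a]).getLast?).getD d = a := by
  simp

theorem pvLoop_eq (s : PySem.Set Int) (gap : Int) :
    ∀ (rest cur : List Int) (clusters : List (List Int)),
    cur ≠ [] → List.Pairwise (· < ·) (cur ++ rest) →
    (((rest.foldl (fun (st : List (List Int) × List Int) ts =>
        if ts - PySem.List.pyGetD st.2 (-1) 0 ≤ gap then (st.1, st.2 ++ [ts])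
        else (st.1 ++ [st.2], [ts])) (clusters, cur)).1
      ++ [(rest.foldl (fun (st : List (List Int) × List Int) ts =>
        if ts - PySem.List.pyGetD st.2 (-1) 0 ≤ gap then (st.1, st.2 ++ [ts])
        else (st.1 ++ [st.2], [ts])) (clusters, cur)).2]).map (pvAnchor s))
    = pvAltLoop s gap rest (clusters.map (pvAnchor s)) ((cur.getLast?).getD 0)
        ((cur.filter (fun ts => PySem.Set.contains s ts)).getLast?)
  | [], cur, clusters, hne, hpw => by
    simp only [List.foldl_nil, List.map_append, List.map_cons, List.map_nil, pvAltLoop]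
    rw [pvAnchor_eq s cur hne ((List.pairwise_append.1 hpw).1.imp le_of_lt)]
  | ts :: rest, cur, clusters, hne, hpw => by
    have hprev : PySem.List.pyGetD cur (-1) 0 = (cur.getLast?).getD 0 := by
      rw [PySem.List.pyGetD_neg_one cur 0 hne, List.getLast?_eq_some_getLast hne]
      rfl
    simp only [List.foldl_cons, hprev]
    by_cases hgap : ts - (cur.getLast?).getD 0 ≤ gap
    · -- same cluster: append ts
      have hpw' : List.Pairwise (· < ·) ((cur ++ [ts]) ++ rest) := by
        rw [List.append_assoc]; simpa using hpw
      have ih := pvLoop_eq s gap rest (cur ++ [ts]) clusters (by simp) hpw'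
      simp only [if_pos hgap]
      rw [ih, pvGetLastD_concat]
      have hfilt : ((cur ++ [ts]).filter (fun t => PySem.Set.contains s t)).getLast?
          = if PySem.Set.contains s ts then some ts
            else (cur.filter (fun t => PySem.Set.contains s t)).getLast? := by
        rw [List.filter_append]
        by_cases hm : ts ∈ s
        · simp [List.filter, hm]
        · simp [List.filter, hm]
      rw [hfilt]
      simp only [pvAltLoop]
      rw [if_neg (not_lt.mpr hgap)]
    · -- gap break: start new cluster [ts]
      have hrest : List.Pairwise (· < ·) (ts :: rest) := (List.pairwise_append.1 hpw).2.1
      have hpw' : List.Pairwise (· < ·) ([ts] ++ rest) := by simpa using hrest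
      have ih := pvLoop_eq s gap rest [ts] (clusters ++ [cur]) (by simp) hpw'
      simp only [if_neg hgap]
      rw [ih]
      simp only [List.map_append, List.map_cons, List.map_nil]
      rw [pvAnchor_eq s cur hne ((List.pairwise_append.1 hpw).1.imp le_of_lt)]
      have hf1 : ([ts].filter (fun t => PySem.Set.contains s t)).getLast?
          = if PySem.Set.contains s ts then some ts else none := by
        by_cases hm : ts ∈ s <;> simp [List.filter, hm]
      rw [hf1]
      simp only [pvAltLoop, if_pos (by omega : ts - (cur.getLast?).getD 0 > gap),
        List.getLast?_singleton, Option.getD_some]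

theorem foldl_anchor (s : PySem.Set Int) :
    ∀ (l : List (List Int)) (init : List Int),
    l.foldl (fun anchors cluster =>
        let npk_candidates := cluster.filter (fun ts => PySem.Set.contains s ts)
        if npk_candidates ≠ [] then anchors ++ [pvAMax npk_candidates]
        else anchors ++ [pvAMax cluster]) init = init ++ l.map (pvAnchor s)
  | [], init => by simp
  | c :: l, init => by
    rw [List.foldl_cons, foldl_anchor s l]
    simp only [List.map_cons, pvAnchor]
    split <;> simp

-- ===== VERDICT (by name: the statement is the Claim_ definition above) =====
theorem cluster_anchors_py_spec : Claim_equal_cluster_anchors_py := by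
  intro npk_ts sht_ts gap_sec _
  unfold Spec_cluster_anchors_py cluster_anchors_py cluster_anchors_py_alt
  by_cases hboth : npk_ts = [] ∧ sht_ts = []
  · obtain ⟨h1, h2⟩ := hboth
    subst h1; subst h2
    rfl
  · rw [if_neg hboth]
    set u : List Int := PySem.Set.union (PySem.Set.ofList npk_ts) (PySem.Set.ofList sht_ts) with hu
    have hune : u ≠ [] := by
      intro h0
      rcases (not_and_or.1 hboth) with hn | hs
      · obtain ⟨x, t, hx⟩ := List.exists_cons_of_ne_nil hn
        have : x ∈ u := by
          rw [hu]; rw [PySem.Set.mem_union]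
          left; rw [PySem.Set.mem_ofList]; rw [hx]; simp
        rw [h0] at this; simp at this
      · obtain ⟨x, t, hx⟩ := List.exists_cons_of_ne_nil hs
        have : x ∈ u := by
          rw [hu]; rw [PySem.Set.mem_union]
          right; rw [PySem.Set.mem_ofList]; rw [hx]; simp
        rw [h0] at this; simp at this
    set pts : List Int := PySem.List.sorted u (fun x => x) false with hpts
    have hptsne : pts ≠ [] := by
      intro h0
      rw [hpts, PySem.List.sorted_eq_nil_iff] at h0
      exact hune h0
    have hnd : pts.Nodup := by
      have hun : u.Nodup := by
        rw [hu]
        exact PySem.Set.nodup_union _ _ (PySem.Set.nodup_ofList npk_ts)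
      exact ((PySem.List.sorted_perm u (fun x => x) false).symm.nodup) hun
    have hle : pts.Pairwise (· ≤ ·) := by
      have := PySem.List.sorted_pairwise u (fun x => x)
      simpa using this
    have hlt : pts.Pairwise (· < ·) :=
      (hle.and hnd).imp (fun h => lt_of_le_of_ne h.1 h.2)
    obtain ⟨p0, rest, hcons⟩ := List.exists_cons_of_ne_nil hptsne
    rw [hcons]
    simp only []
    rw [foldl_anchor (PySem.Set.ofList npk_ts)]
    rw [List.nil_append]
    have hpw : List.Pairwise (· < ·) ([p0] ++ rest) := by
      rw [hcons] at hlt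
      simpa using hlt
    rw [pvLoop_eq (PySem.Set.ofList npk_ts) gap_sec rest [p0] [] (by simp) hpw]
    have hf1 : ([p0].filter (fun t => PySem.Set.contains (PySem.Set.ofList npk_ts) t)).getLast?
        = if PySem.Set.contains (PySem.Set.ofList npk_ts) p0 then some p0 else none := by
      by_cases hm : p0 ∈ PySem.Set.ofList npk_ts <;> simp [List.filter, hm]
    rw [hf1]
    rfl
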